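-- pv_equiv track=rewrite | github.com/casemiromjm/feup | fp/py playground/py05/first_repeating_letter.py | repeated_letter
-- ===== SOURCE A (Python) =====
-- def repeated_letter(s):
--     letters = []
--     for i in s:
--         if s.count(i) > 1:
--             letters.append(i)
--         if letters.count(i) > 1:
--             letters.remove(i)
--
--     if not letters:
--             return None
--
--     letters.reverse()
--     indexes = []
--     for j in range(len(letters)):
--         index = letters.index(letters[j])
--         indexes.append(index)
--
--     return letters[min(indexes)]
-- ===== SOURCE B (Python) =====
-- def repeated_letter(s):
--     counts = {}
--     for c in s:
--         counts[c] = counts.get(c, 0) + 1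
--     for c in reversed(s):
--         if counts[c] > 1:
--             return c
--     return None
-- ===== Notes on version B (the rewrite author's own statement) =====
-- stated objective: faster
-- what changed: Replaces A's quadratic append/remove list maintenance plus the reverse/index/min second phase with one counting-dict pass over s and one backward scan that returns the first character whose count exceeds 1.
import Mathlib
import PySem

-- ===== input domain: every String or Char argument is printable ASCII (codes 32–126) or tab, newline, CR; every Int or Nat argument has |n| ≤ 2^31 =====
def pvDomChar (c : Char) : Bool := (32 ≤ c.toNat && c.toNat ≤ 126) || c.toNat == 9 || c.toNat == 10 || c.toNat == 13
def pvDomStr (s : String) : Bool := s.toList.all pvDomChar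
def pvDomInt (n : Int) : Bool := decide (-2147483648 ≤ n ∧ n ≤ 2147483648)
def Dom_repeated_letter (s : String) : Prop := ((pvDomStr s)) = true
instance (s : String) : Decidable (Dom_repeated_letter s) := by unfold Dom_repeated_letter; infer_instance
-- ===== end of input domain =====

-- B replaces A's list-maintenance scan and reverse/index/min phase with one counting-dict pass and one backward scan (objective: faster).

-- ===== PORT A =====
def repeated_letter (s : String) : Option String :=
  let l := s.toList
  let letters := l.foldl (fun letters i =>
    let letters := if PySem.List.count l i > 1 then letters ++ [i] else letters
    if PySem.List.count letters i > 1 then (PySem.List.remove? letters i).getD letters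
    else letters) ([] : List Char)
  if letters = [] then none
  else
    let letters2 := letters.reverse
    let indexes := (PySem.List.pyRange 0 (letters2.length : Int) 1).map (fun j =>
      (PySem.List.index? letters2 (PySem.List.pyGetD letters2 j 'a')).getD 0)
    match PySem.List.min? indexes (fun x => x) with
    | some m => some (String.ofList [letters2.getD m 'a'])
    | none => none

-- ===== PORT B =====
def repeated_letter_alt (s : String) : Option String :=
  let l := s.toList
  let counts := l.foldl (fun d c => d.insert c (d.getD c 0 + 1)) (PySem.Dict.empty : PySem.Dict Char Int)
  match l.reverse.find? (fun c => decide (counts.getD c 0 > 1)) with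
  | some c => some (String.ofList [c])
  | none => none

-- ===== PRECONDITION & SPEC =====
def Spec_repeated_letter (s : String) (out : Option String) : Prop := out = repeated_letter_alt s
instance (s : String) (out : Option String) : Decidable (Spec_repeated_letter s out) := by unfold Spec_repeated_letter; infer_instance

-- ===== CLAIM (what is proved, stated in full; the proofs are below) =====
def Claim_equal_repeated_letter : Prop := ∀ (s : String), Dom_repeated_letter s → Spec_repeated_letter s (repeated_letter s)

-- ===== LEMMAS AND PROOFS =====

theorem dedup_append_singleton (q : List Char) (c : Char) :
    (q ++ [c]).dedup = q.dedup.erase c ++ [c] := by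
  induction q with
  | nil => simp
  | cons a q ih =>
    by_cases ha : a ∈ q ++ [c]
    · rw [List.cons_append, List.dedup_cons_of_mem ha, ih]
      rcases List.mem_append.1 ha with h | h
      · rw [List.dedup_cons_of_mem h]
      · simp only [List.mem_singleton] at h
        subst h
        by_cases hq : a ∈ q
        · rw [List.dedup_cons_of_mem hq]
        · rw [List.dedup_cons_of_notMem hq, List.erase_cons_head]
          rw [List.erase_of_not_mem (by simpa using hq)]
    · have hq : a ∉ q := fun h => ha (List.mem_append.2 (Or.inl h))
      have hac : a ≠ c := by simp [List.mem_append] at ha; tauto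
      rw [List.cons_append, List.dedup_cons_of_notMem ha, ih,
          List.dedup_cons_of_notMem hq, List.erase_cons_tail (by simp [hac]), List.cons_append]

theorem find?_eq_head?_filter (p : Char → Bool) (xs : List Char) :
    xs.find? p = (xs.filter p).head? := by
  induction xs with
  | nil => rfl
  | cons x xs ih =>
    by_cases h : p x
    · rw [List.find?_cons_of_pos h, List.filter_cons_of_pos h, List.head?_cons]
    · rw [List.find?_cons_of_neg h, List.filter_cons_of_neg h, ih]

theorem foldA_eq (l p : List Char) :
    p.foldl (fun letters i =>
      let letters := if PySem.List.count l i > 1 then letters ++ [i] else letters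
      if PySem.List.count letters i > 1 then (PySem.List.remove? letters i).getD letters
      else letters) [] = (p.filter (fun c => decide (l.count c > 1))).dedup := by
  induction p using List.reverseRecOn with
  | nil => rfl
  | append_singleton q c ih =>
    rw [List.foldl_append, ih, List.foldl_cons, List.foldl_nil, List.filter_append]
    set D := (q.filter (fun c => decide (l.count c > 1))).dedup with hD
    have hnd : D.Nodup := List.nodup_dedup _
    by_cases hP : l.count c > 1
    · have hf : List.filter (fun c => decide (l.count c > 1)) [c] = [c] := by simp [hP]
      rw [hf, dedup_append_singleton]
      simp only [PySem.List.count_eq, if_pos hP]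
      by_cases hc : c ∈ D
      · have h1 : List.count c D = 1 := List.count_eq_one_of_mem hnd hc
        have h2 : List.count c (D ++ [c]) = 2 := by
          rw [List.count_append, h1]; simp
        rw [h2, if_pos (by omega)]
        rw [PySem.List.remove?_eq_some_erase _ _ (by simp), Option.getD_some,
            List.erase_append_left _ hc]
      · have h1 : List.count c D = 0 := List.count_eq_zero_of_not_mem hc
        have h2 : List.count c (D ++ [c]) = 1 := by
          rw [List.count_append, h1]; simp
        rw [h2, if_neg (by omega), List.erase_of_not_mem hc]
    · have hcD : c ∉ D := by
        intro h
        have := List.of_mem_filter (List.mem_dedup.1 h)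
        simp at this; omega
      have hf : List.filter (fun c => decide (l.count c > 1)) [c] = [] := by simp [hP]
      rw [hf, List.append_nil]
      simp only [PySem.List.count_eq, if_neg hP]
      rw [if_neg (by rw [List.count_eq_zero_of_not_mem hcD]; omega)]


theorem ab_eq (s : String) : repeated_letter s = repeated_letter_alt s := by
  unfold repeated_letter repeated_letter_alt
  simp only [foldA_eq, PySem.Dict.foldl_insert_getD_add_one_eq_counter]
  simp only [PySem.Dict.getD_counter, gt_iff_lt, Nat.one_lt_cast]
  rw [find?_eq_head?_filter, List.filter_reverse, List.head?_reverse]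
  set F := s.toList.filter (fun c => decide (1 < List.count c s.toList)) with hF
  by_cases h0 : F = []
  · rw [h0]; simp
  · have hd : F.dedup ≠ [] := by simpa [List.dedup_eq_nil] using h0
    rw [if_neg hd]
    obtain ⟨q, c, hqc⟩ := (List.eq_nil_or_concat F).resolve_left h0
    rw [hqc, List.concat_eq_append, List.getLast?_concat, dedup_append_singleton, List.reverse_concat]
    set t := (q.dedup.erase c).reverse with ht
    have hget0 : PySem.List.pyGetD (c :: t) ((0 : Int)) 'a' = c := by
      simp [PySem.List.pyGetD, PySem.List.pyGet?, PySem.List.pyIdx?]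
    have h0mem : (0 : Nat) ∈ (PySem.List.pyRange 0 (((c :: t).length : Nat) : Int) 1).map
        (fun j => (PySem.List.index? (c :: t) (PySem.List.pyGetD (c :: t) j 'a')).getD 0) := by
      refine List.mem_map.2 ⟨0, ?_, ?_⟩
      · rw [PySem.List.mem_pyRange_one]
        constructor
        · exact le_refl 0
        · exact_mod_cast Nat.succ_pos t.length
      · rw [hget0, PySem.List.index?_cons_self]
        rfl
    have hmin : PySem.List.min? ((PySem.List.pyRange 0 (((c :: t).length : Nat) : Int) 1).map
        (fun j => (PySem.List.index? (c :: t) (PySem.List.pyGetD (c :: t) j 'a')).getD 0))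
        (fun x => x) = some 0 := by
      cases hm : PySem.List.min? ((PySem.List.pyRange 0 (((c :: t).length : Nat) : Int) 1).map
          (fun j => (PySem.List.index? (c :: t) (PySem.List.pyGetD (c :: t) j 'a')).getD 0))
          (fun x => x) with
      | none =>
        rw [PySem.List.min?_eq_none_iff] at hm
        rw [hm] at h0mem
        exact absurd h0mem (List.not_mem_nil)
      | some m =>
        have hle := PySem.List.min?_isMin hm 0 h0mem
        simp only [Nat.le_zero] at hle
        rw [hle]
    rw [hmin]
    rfl

-- ===== VERDICT (by name: the statement is the Claim_ definition above) =====
theorem repeated_letter_spec : Claim_equal_repeated_letter := fun s _ => ab_eq s
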